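-- pv_equiv track=rewrite | github.com/harshith1204/assistant | app/core/web_research.py | cluster_by_topic
-- ===== SOURCE A (Python) =====
-- from typing import List, Dict, Any, Optional
--
-- def cluster_by_topic(sources: List[Dict[str, Any]]) -> Dict[str, List[Dict[str, Any]]]:
--     """Cluster sources by topic (simple keyword-based clustering)"""
--     clusters = {
--         'market': [],
--         'competitors': [],
--         'pricing': [],
--         'technology': [],
--         'regulation': [],
--         'customers': [],
--         'other': []
--     }
--
--     topic_keywords = {
--         'market': ['market', 'TAM', 'growth', 'size', 'forecast', 'trend'],
--         'competitors': ['competitor', 'rival', 'versus', 'comparison', 'alternative'],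
--         'pricing': ['price', 'pricing', 'cost', 'fee', 'subscription', 'revenue'],
--         'technology': ['technology', 'tech', 'platform', 'software', 'AI', 'digital'],
--         'regulation': ['regulation', 'compliance', 'law', 'legal', 'policy', 'government'],
--         'customers': ['customer', 'client', 'user', 'buyer', 'segment', 'persona']
--     }
--
--     for source in sources:
--         content_lower = (source.get('content', '') + source.get('title', '')).lower()
--
--         assigned = False
--         for topic, keywords in topic_keywords.items():
--             if any(keyword in content_lower for keyword in keywords):
--                 clusters[topic].append(source)
--                 assigned = True
--                 break
--
--         if not assigned:
--             clusters['other'].append(source)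
--
--     # Remove empty clusters
--     return {k: v for k, v in clusters.items() if v}
-- ===== SOURCE B (Python) =====
-- from typing import List, Dict, Any
--
-- _TOPIC_KEYWORDS = [
--     ('market', ['market', 'TAM', 'growth', 'size', 'forecast', 'trend']),
--     ('competitors', ['competitor', 'rival', 'versus', 'comparison', 'alternative']),
--     ('pricing', ['price', 'pricing', 'cost', 'fee', 'subscription', 'revenue']),
--     ('technology', ['technology', 'tech', 'platform', 'software', 'AI', 'digital']),
--     ('regulation', ['regulation', 'compliance', 'law', 'legal', 'policy', 'government']),
--     ('customers', ['customer', 'client', 'user', 'buyer', 'segment', 'persona']),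
-- ]
--
--
-- def _label(source: Dict[str, Any]) -> str:
--     """Single topic label for a source: first topic (in fixed order) whose
--     keyword list has a hit in the lowercased content+title, else 'other'."""
--     text = (source.get('content', '') + source.get('title', '')).lower()
--     for topic, keywords in _TOPIC_KEYWORDS:
--         if any(k in text for k in keywords):
--             return topic
--     return 'other'
--
--
-- def cluster_by_topic(sources: List[Dict[str, Any]]) -> Dict[str, List[Dict[str, Any]]]:
--     """Cluster sources by topic (simple keyword-based clustering)"""
--     labels = [_label(s) for s in sources]
--     result = {}
--     for topic, _ in _TOPIC_KEYWORDS + [('other', [])]: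
--         group = [s for s, lab in zip(sources, labels) if lab == topic]
--         if group:
--             result[topic] = group
--     return result
-- ===== Notes on version B (the rewrite author's own statement) =====
-- stated objective: alternative
-- what changed: A threads every source through a mutable seven-key cluster dict with an 'assigned' flag and break inside one loop; B first labels each source with a pure helper returning its single topic, then builds the output by one collection pass per fixed topic name, keeping only non-empty groups.
import Mathlib
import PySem

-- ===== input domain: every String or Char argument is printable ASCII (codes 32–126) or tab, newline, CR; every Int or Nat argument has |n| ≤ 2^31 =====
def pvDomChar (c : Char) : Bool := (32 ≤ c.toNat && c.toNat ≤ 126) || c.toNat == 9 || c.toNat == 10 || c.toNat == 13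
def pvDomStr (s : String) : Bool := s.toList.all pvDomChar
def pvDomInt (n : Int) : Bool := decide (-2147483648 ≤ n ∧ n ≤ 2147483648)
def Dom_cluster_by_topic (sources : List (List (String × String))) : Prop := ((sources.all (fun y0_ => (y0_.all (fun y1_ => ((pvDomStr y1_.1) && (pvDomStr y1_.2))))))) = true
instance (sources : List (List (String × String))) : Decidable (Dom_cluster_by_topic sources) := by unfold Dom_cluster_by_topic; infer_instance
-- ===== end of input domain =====

-- B replaces A's single pass over a mutable seven-key cluster dict (with an 'assigned' flag and break)
-- by a label-then-collect decomposition: one pure labelling pass, then one collection pass per fixed topic.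

-- ===== PORT A =====
def pvTopicKeywords : List (String × List String) :=
  [("market", ["market", "TAM", "growth", "size", "forecast", "trend"]),
   ("competitors", ["competitor", "rival", "versus", "comparison", "alternative"]),
   ("pricing", ["price", "pricing", "cost", "fee", "subscription", "revenue"]),
   ("technology", ["technology", "tech", "platform", "software", "AI", "digital"]),
   ("regulation", ["regulation", "compliance", "law", "legal", "policy", "government"]),
   ("customers", ["customer", "client", "user", "buyer", "segment", "persona"])]

-- source.get(k, '') on the association-list dict: first matching key, default ''
def pvGetStr (src : List (String × String)) (k : String) : String :=
  (((src.find? (fun p => p.1 == k)).map Prod.snd).getD "")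

-- A's inner "for topic, keywords in topic_keywords.items(): … break" together with the
-- trailing "if not assigned: clusters['other'].append(source)"
def pvAssignLoop (clusters : PySem.Dict String (List (List (String × String))))
    (source : List (String × String)) (contentLower : String) :
    List (String × List String) → PySem.Dict String (List (List (String × String)))
  | [] => clusters.modify "other" [] (fun v => v ++ [source])
  | (topic, keywords) :: rest =>
    if keywords.any (fun keyword => PySem.Str.isIn keyword contentLower) then
      clusters.modify topic [] (fun v => v ++ [source])
    else
      pvAssignLoop clusters source contentLower rest

def cluster_by_topic (sources : List (List (String × String))) :
    List (String × List (List (String × String))) :=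
  let clusters0 : PySem.Dict String (List (List (String × String))) :=
    PySem.Dict.mk [("market", []), ("competitors", []), ("pricing", []),
                   ("technology", []), ("regulation", []), ("customers", []), ("other", [])]
  let clusters := sources.foldl (fun clusters source =>
    pvAssignLoop clusters source
      (PySem.Str.lower (pvGetStr source "content" ++ pvGetStr source "title"))
      pvTopicKeywords) clusters0
  clusters.items.filter (fun kv => !kv.2.isEmpty)

-- ===== PORT B =====
-- first topic (in fixed order) whose keyword list hits the lowercased content+title, else 'other'
def pvLabelLoop (text : String) : List (String × List String) → String
  | [] => "other"
  | (topic, keywords) :: rest =>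
    if keywords.any (fun k => PySem.Str.isIn k text) then topic else pvLabelLoop text rest

def pvLabel (source : List (String × String)) : String :=
  pvLabelLoop (PySem.Str.lower (pvGetStr source "content" ++ pvGetStr source "title"))
    pvTopicKeywords

def cluster_by_topic_alt (sources : List (List (String × String))) :
    List (String × List (List (String × String))) :=
  let labels := sources.map pvLabel
  (pvTopicKeywords ++ [("other", [])]).foldl
    (fun (result : List (String × List (List (String × String)))) (tk : String × List String) =>
      let group := ((sources.zip labels).filter
        (fun (sl : List (String × String) × String) => sl.2 == tk.1)).map Prod.fst
      if group.isEmpty then result else result ++ [(tk.1, group)]) []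

-- ===== PRECONDITION & SPEC =====
def Spec_cluster_by_topic (sources : List (List (String × String))) (out : List (String × List (List (String × String)))) : Prop := out = cluster_by_topic_alt sources
instance (sources : List (List (String × String))) (out : List (String × List (List (String × String)))) : Decidable (Spec_cluster_by_topic sources out) := by unfold Spec_cluster_by_topic; infer_instance

-- ===== CLAIM (what is proved, stated in full; the proofs are below) =====
def Claim_equal_cluster_by_topic : Prop := ∀ (sources : List (List (String × String))), Dom_cluster_by_topic sources → Spec_cluster_by_topic sources (cluster_by_topic sources)

-- ===== LEMMAS AND PROOFS =====

-- a cluster dict over the seven fixed keys, abbreviated by its seven value lists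
def pvMkD (a b c d e f g : List (List (String × String))) :
    PySem.Dict String (List (List (String × String))) :=
  PySem.Dict.mk [("market", a), ("competitors", b), ("pricing", c),
                 ("technology", d), ("regulation", e), ("customers", f), ("other", g)]

theorem pvAssignLoop_eq (c : PySem.Dict String (List (List (String × String))))
    (s : List (String × String)) (t : String) (L : List (String × List String)) :
    pvAssignLoop c s t L = c.modify (pvLabelLoop t L) [] (fun v => v ++ [s]) := by
  induction L with
  | nil => rfl
  | cons tk rest ih =>
    obtain ⟨topic, keywords⟩ := tk
    simp only [pvAssignLoop, pvLabelLoop]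
    split <;> simp [ih]

theorem pvLabelLoop_mem (t : String) (L : List (String × List String)) :
    pvLabelLoop t L ∈ L.map Prod.fst ++ ["other"] := by
  induction L with
  | nil => simp [pvLabelLoop]
  | cons tk rest ih =>
    obtain ⟨topic, keywords⟩ := tk
    simp only [pvLabelLoop]
    split
    · simp
    · simpa using Or.inr (by simpa using ih)

theorem pvLabel_cases (s : List (String × String)) :
    pvLabel s = "market" ∨ pvLabel s = "competitors" ∨ pvLabel s = "pricing" ∨
    pvLabel s = "technology" ∨ pvLabel s = "regulation" ∨ pvLabel s = "customers" ∨
    pvLabel s = "other" := by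
  have h := pvLabelLoop_mem
    (PySem.Str.lower (pvGetStr s "content" ++ pvGetStr s "title")) pvTopicKeywords
  simpa [pvLabel, pvTopicKeywords] using h

theorem pvModify_market (a b c d e f g : List (List (String × String)))
    (F : List (List (String × String)) → List (List (String × String))) :
    (pvMkD a b c d e f g).modify "market" [] F = pvMkD (F a) b c d e f g := rfl
theorem pvModify_competitors (a b c d e f g : List (List (String × String)))
    (F : List (List (String × String)) → List (List (String × String))) :
    (pvMkD a b c d e f g).modify "competitors" [] F = pvMkD a (F b) c d e f g := rfl
theorem pvModify_pricing (a b c d e f g : List (List (String × String)))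
    (F : List (List (String × String)) → List (List (String × String))) :
    (pvMkD a b c d e f g).modify "pricing" [] F = pvMkD a b (F c) d e f g := rfl
theorem pvModify_technology (a b c d e f g : List (List (String × String)))
    (F : List (List (String × String)) → List (List (String × String))) :
    (pvMkD a b c d e f g).modify "technology" [] F = pvMkD a b c (F d) e f g := rfl
theorem pvModify_regulation (a b c d e f g : List (List (String × String)))
    (F : List (List (String × String)) → List (List (String × String))) :
    (pvMkD a b c d e f g).modify "regulation" [] F = pvMkD a b c d (F e) f g := rfl
theorem pvModify_customers (a b c d e f g : List (List (String × String)))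
    (F : List (List (String × String)) → List (List (String × String))) :
    (pvMkD a b c d e f g).modify "customers" [] F = pvMkD a b c d e (F f) g := rfl
theorem pvModify_other (a b c d e f g : List (List (String × String)))
    (F : List (List (String × String)) → List (List (String × String))) :
    (pvMkD a b c d e f g).modify "other" [] F = pvMkD a b c d e f (F g) := rfl

theorem pvFold_steps (srcs : List (List (String × String))) :
    ∀ a b c d e f g : List (List (String × String)),
    srcs.foldl (fun cl s => cl.modify (pvLabel s) [] (fun v => v ++ [s])) (pvMkD a b c d e f g)
      = pvMkD (a ++ srcs.filter (fun s => pvLabel s == "market"))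
              (b ++ srcs.filter (fun s => pvLabel s == "competitors"))
              (c ++ srcs.filter (fun s => pvLabel s == "pricing"))
              (d ++ srcs.filter (fun s => pvLabel s == "technology"))
              (e ++ srcs.filter (fun s => pvLabel s == "regulation"))
              (f ++ srcs.filter (fun s => pvLabel s == "customers"))
              (g ++ srcs.filter (fun s => pvLabel s == "other")) := by
  induction srcs with
  | nil => intro a b c d e f g; simp
  | cons s rest ih =>
    intro a b c d e f g
    simp only [List.foldl_cons]
    rcases pvLabel_cases s with h | h | h | h | h | h | h <;>
      rw [h] <;>
      first
      | (rw [pvModify_market, ih]; simp [pvMkD, h, List.append_assoc])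
      | (rw [pvModify_competitors, ih]; simp [pvMkD, h, List.append_assoc])
      | (rw [pvModify_pricing, ih]; simp [pvMkD, h, List.append_assoc])
      | (rw [pvModify_technology, ih]; simp [pvMkD, h, List.append_assoc])
      | (rw [pvModify_regulation, ih]; simp [pvMkD, h, List.append_assoc])
      | (rw [pvModify_customers, ih]; simp [pvMkD, h, List.append_assoc])
      | (rw [pvModify_other, ih]; simp [pvMkD, h, List.append_assoc])

theorem pvZip_label_filter (l : List (List (String × String))) (t : String) :
    ((l.zip (l.map pvLabel)).filter (fun sl => sl.2 == t)).map Prod.fst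
      = l.filter (fun s => pvLabel s == t) := by
  have h1 : l.zip (l.map pvLabel) = l.map (fun s => (s, pvLabel s)) := by
    induction l with
    | nil => rfl
    | cons x l ih => simp only [List.map_cons, List.zip_cons_cons, ih]
  rw [h1, List.filter_map, List.map_map]
  simp [Function.comp_def]

theorem pvFoldl_collect (G : String → List (List (String × String))) :
    ∀ (ts : List (String × List String)) (acc : List (String × List (List (String × String)))),
    ts.foldl (fun r tk => if (G tk.1).isEmpty then r else r ++ [(tk.1, G tk.1)]) acc
      = acc ++ (ts.map (fun tk => (tk.1, G tk.1))).filter (fun kv => !kv.2.isEmpty) := by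
  intro ts
  induction ts with
  | nil => intro acc; simp
  | cons tk ts ih =>
    intro acc
    simp only [List.foldl_cons, List.map_cons, List.filter_cons]
    by_cases h : (G tk.1).isEmpty = true
    · rw [if_pos h, ih]; simp [h]
    · rw [if_neg h, ih]; simp [h, List.append_assoc]

-- ===== VERDICT (by name: the statement is the Claim_ definition above) =====
theorem cluster_by_topic_spec : Claim_equal_cluster_by_topic := by
  intro sources _
  simp only [Spec_cluster_by_topic, cluster_by_topic, cluster_by_topic_alt]
  have hfun : (fun (clusters : PySem.Dict String (List (List (String × String)))) source =>
      pvAssignLoop clusters source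
        (PySem.Str.lower (pvGetStr source "content" ++ pvGetStr source "title"))
        pvTopicKeywords)
      = (fun cl s => cl.modify (pvLabel s) [] (fun v => v ++ [s])) := by
    funext c s; rw [pvAssignLoop_eq]; rfl
  rw [hfun, show (PySem.Dict.mk [("market", ([] : List (List (String × String)))),
      ("competitors", []), ("pricing", []), ("technology", []), ("regulation", []),
      ("customers", []), ("other", [])]) = pvMkD [] [] [] [] [] [] [] from rfl,
    pvFold_steps]
  simp only [List.nil_append, pvZip_label_filter,
    pvFoldl_collect (fun t => sources.filter (fun s => pvLabel s == t))]
  simp [pvMkD, pvTopicKeywords]
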